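-- pv_equiv track=rewrite | github.com/calvincramer/coding-challenges | leet-code/src/problems/p949.py | range_max
-- ===== SOURCE A (Python) =====
-- def range_max(lst, max):
--     max_n = lst[0] if lst[0] <= max else None
--     ind = 0 if max_n is not None else None
--     for i,n in enumerate(lst):
--         if max_n is None:
--             if n <= max:
--                 max_n = n
--                 ind = i
--         elif max_n < n <= max:
--             max_n = n
--             ind = i
--     return ind
-- ===== SOURCE B (Python) =====
-- def range_max(lst, max):
--     eligible = sorted(n for n in lst if n <= max)
--     return lst.index(eligible[-1]) if eligible else None
-- ===== Notes on version B (the rewrite author's own statement) =====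
-- stated objective: simpler
-- what changed: Replaces the accumulating None-state scan with a build-then-reduce form: filter eligible values, sort, take the largest, and let list.index find its earliest position.
-- crash fix: On the empty list A raises IndexError from lst[0]; B returns None (no eligible element). — e.g. on range_max([], 0): A raises IndexError, B returns none
import Mathlib
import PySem

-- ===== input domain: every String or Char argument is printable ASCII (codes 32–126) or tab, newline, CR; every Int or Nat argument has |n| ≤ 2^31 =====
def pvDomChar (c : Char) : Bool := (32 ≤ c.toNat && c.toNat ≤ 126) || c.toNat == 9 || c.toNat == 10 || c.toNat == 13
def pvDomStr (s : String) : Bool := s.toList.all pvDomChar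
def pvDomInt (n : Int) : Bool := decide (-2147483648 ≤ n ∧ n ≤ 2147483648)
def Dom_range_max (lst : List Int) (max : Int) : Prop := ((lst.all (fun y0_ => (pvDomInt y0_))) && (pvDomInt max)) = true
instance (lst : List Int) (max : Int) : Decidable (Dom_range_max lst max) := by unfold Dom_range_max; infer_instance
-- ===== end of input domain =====

-- B replaces A's accumulating None-state scan by filter / sort / index (same result, not faster).

-- ===== PORT A =====
-- one loop step of A's for-loop (state = (max_n, ind), element = (i, n))
def rmStep (mx : Int) (st : Option Int × Option Int) (p : Int × Int) : Option Int × Option Int :=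
  match st.1 with
  | none => if p.2 ≤ mx then (some p.2, some p.1) else st
  | some m => if m < p.2 ∧ p.2 ≤ mx then (some p.2, some p.1) else st

def range_max (lst : List Int) (max : Int) : Option Int :=
  match PySem.List.pyGet? lst 0 with
  | none => none   -- lst[0] raises IndexError here; excluded by Pre_range_max
  | some h =>
    let max_n : Option Int := if h ≤ max then some h else none
    let ind : Option Int := if max_n.isSome then some 0 else none
    ((PySem.List.enumerate lst 0).foldl (rmStep max) (max_n, ind)).2

-- ===== PORT B =====
def range_max_alt (lst : List Int) (max : Int) : Option Int :=
  let eligible := PySem.List.sorted (lst.filter (fun n => n ≤ max)) (fun x => x) false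
  match PySem.List.pyGet? eligible (-1) with
  | some m => (PySem.List.index? lst m).map (fun k => (k : Int))
  | none => none

-- ===== PRECONDITION & SPEC =====
-- Pre_ excludes only the empty list, on which A raises IndexError at lst[0].
def Pre_range_max (lst : List Int) (max : Int) : Prop := lst ≠ []
instance (lst : List Int) (max : Int) : Decidable (Pre_range_max lst max) := by unfold Pre_range_max; infer_instance
def pvWitness_range_max : List Int × Int := ([1], 0)

-- On the empty list A raises IndexError from lst[0]; B returns None (no eligible element) — proved below as range_max_raises.
def Raises_range_max (lst : List Int) (max : Int) : Prop := lst = []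
instance (lst : List Int) (max : Int) : Decidable (Raises_range_max lst max) := by unfold Raises_range_max; infer_instance
def pvRaiseWitness_range_max : List Int × Int := ([], 0)
def pvRaiseWitnessOut_range_max : Option Int := none

def Spec_range_max (lst : List Int) (max : Int) (out : Option Int) : Prop := out = range_max_alt lst max
instance (lst : List Int) (max : Int) (out : Option Int) : Decidable (Spec_range_max lst max out) := by unfold Spec_range_max; infer_instance

-- ===== CLAIM (what is proved, stated in full; the proofs are below) =====
def Claim_equal_range_max : Prop := ∀ (lst : List Int) (max : Int), Dom_range_max lst max → Pre_range_max lst max → Spec_range_max lst max (range_max lst max)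
def Claim_raises_range_max : Prop := (∀ (lst : List Int) (max : Int), Dom_range_max lst max → Raises_range_max lst max → ¬ Pre_range_max lst max) ∧ (Dom_range_max (pvRaiseWitness_range_max.1) (pvRaiseWitness_range_max.2) ∧ Raises_range_max (pvRaiseWitness_range_max.1) (pvRaiseWitness_range_max.2) ∧ range_max_alt (pvRaiseWitness_range_max.1) (pvRaiseWitness_range_max.2) = pvRaiseWitnessOut_range_max)

-- ===== LEMMAS AND PROOFS =====

-- A's fold from the empty state computes (max of eligible values, first index of that value)
theorem rm_inv (mx : Int) (xs : List Int) :
    (PySem.List.enumerate xs 0).foldl (rmStep mx) (none, none) =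
      match (xs.filter (fun n => n ≤ mx)).max? with
      | none => (none, none)
      | some M => (some M, (PySem.List.index? xs M).map (fun k => (k : Int))) := by
  induction xs using List.reverseRecOn with
  | nil => simp [PySem.List.enumerate_nil]
  | append_singleton xs x ih =>
    rw [PySem.List.enumerate_append, List.foldl_append, ih]
    have hen : PySem.List.enumerate [x] (0 + (xs.length : Int)) = [((xs.length : Int), x)] := by
      simp [PySem.List.enumerate_cons, PySem.List.enumerate_nil]
    rw [hen]
    simp only [List.foldl_cons, List.foldl_nil, List.filter_append]
    by_cases hx : x ≤ mx
    · have hfx : List.filter (fun n => decide (n ≤ mx)) [x] = [x] := by simp [hx]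
      rw [hfx]
      cases hM : (xs.filter (fun n => decide (n ≤ mx))).max? with
      | none =>
        have hE : xs.filter (fun n => decide (n ≤ mx)) = [] := List.max?_eq_none_iff.mp hM
        have hxnot : x ∉ xs := by
          intro hmem
          have hmemf : x ∈ xs.filter (fun n => decide (n ≤ mx)) := by
            simp [List.mem_filter, hmem, hx]
          rw [hE] at hmemf; simp at hmemf
        rw [hE]
        simp [rmStep, hx]
        rw [← PySem.List.index?_eq_idxOf?, PySem.List.index?_append_singleton_self xs x hxnot]
        rfl
      | some M =>
        obtain ⟨hMmem, hMub⟩ := List.max?_eq_some_iff.mp hM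
        have hMxs : M ∈ xs := (List.mem_filter.mp hMmem).1
        by_cases hlt : M < x
        · have hxnot : x ∉ xs := by
            intro hmem
            have hmemf : x ∈ xs.filter (fun n => decide (n ≤ mx)) := by
              simp [List.mem_filter, hmem, hx]
            have := hMub x hmemf; omega
          have hmax : (xs.filter (fun n => decide (n ≤ mx)) ++ [x]).max? = some x := by
            rw [List.max?_eq_some_iff]
            refine ⟨by simp, ?_⟩
            intro b hb
            rcases List.mem_append.mp hb with hb | hb
            · have := hMub b hb; omega
            · simp at hb; omega
          simp [rmStep, hlt, hx, hmax]
          rw [← PySem.List.index?_eq_idxOf?, PySem.List.index?_append_singleton_self xs x hxnot]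
          rfl
        · have hmax : (xs.filter (fun n => decide (n ≤ mx)) ++ [x]).max? = some M := by
            rw [List.max?_eq_some_iff]
            refine ⟨List.mem_append.mpr (Or.inl hMmem), ?_⟩
            intro b hb
            rcases List.mem_append.mp hb with hb | hb
            · exact hMub b hb
            · simp at hb; omega
          have hidx : PySem.List.index? (xs ++ [x]) M = PySem.List.index? xs M :=
            PySem.List.index?_append_of_mem [x] hMxs
          simp [rmStep, hlt, hx, hmax]
          simp only [← PySem.List.index?_eq_idxOf?]
          rw [hidx]
    · have hfx : List.filter (fun n => decide (n ≤ mx)) [x] = [] := by simp [hx]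
      rw [hfx, List.append_nil]
      cases hM : (xs.filter (fun n => decide (n ≤ mx))).max? with
      | none => simp [rmStep, hx]
      | some M =>
        obtain ⟨hMmem, _⟩ := List.max?_eq_some_iff.mp hM
        have hMxs : M ∈ xs := (List.mem_filter.mp hMmem).1
        have hidx : PySem.List.index? (xs ++ [x]) M = PySem.List.index? xs M :=
          PySem.List.index?_append_of_mem [x] hMxs
        simp [rmStep, hx]
        simp only [← PySem.List.index?_eq_idxOf?]
        rw [hidx]

-- ===== VERDICT (by name: the statement is the Claim_ definition above) =====
-- the last element of sorted(E) is the value max? names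
theorem getLast_sorted_eq_max (E : List Int) (M : Int) (hM : E.max? = some M) (hne : PySem.List.sorted E (fun x => x) false ≠ []) :
    (PySem.List.sorted E (fun x => x) false).getLast hne = M := by
  obtain ⟨hMmem, hMub⟩ := List.max?_eq_some_iff.mp hM
  have hg : (PySem.List.sorted E (fun x => x) false).getLast hne ∈ E :=
    (PySem.List.mem_sorted E _ false _).mp (List.getLast_mem hne)
  have hMs : M ∈ PySem.List.sorted E (fun x => x) false :=
    (PySem.List.mem_sorted E _ false M).mpr hMmem
  obtain ⟨p, hp, hpe⟩ := List.mem_iff_getElem.mp hMs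
  have hlen : 0 < (PySem.List.sorted E (fun x => x) false).length := List.length_pos_iff.mpr hne
  have hmono := PySem.List.key_sorted_getElem_mono E (fun x => x)
    (p := p) (q := (PySem.List.sorted E (fun x => x) false).length - 1) (by omega) (by omega)
  rw [List.getLast_eq_getElem]
  have h1 : M ≤ (PySem.List.sorted E (fun x => x) false)[(PySem.List.sorted E (fun x => x) false).length - 1] := by
    simpa [hpe] using hmono
  have h2 : (PySem.List.sorted E (fun x => x) false).getLast hne ≤ M := hMub _ hg
  rw [List.getLast_eq_getElem] at h2
  omega

theorem range_max_raises : Claim_raises_range_max := by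
  unfold Claim_raises_range_max
  exact ⟨fun lst mx _ h => by simp [Raises_range_max] at h; simp [Pre_range_max, h], by decide⟩

theorem range_max_spec : Claim_equal_range_max := by
  intro lst mx _ hpre
  unfold Spec_range_max
  obtain ⟨h, t, rfl⟩ : ∃ h t, lst = h :: t := by
    cases lst with
    | nil => exact absurd hpre (range_max_raises.1 [] mx ‹_› rfl)
    | cons h t => exact ⟨h, t, rfl⟩
  unfold range_max range_max_alt
  rw [PySem.List.pyGet?_zero_cons]
  simp only
  have hfold : ((PySem.List.enumerate (h :: t) 0).foldl (rmStep mx)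
      (if h ≤ mx then some h else none, if (if h ≤ mx then some h else (none : Option Int)).isSome then some 0 else none)) =
      (PySem.List.enumerate (h :: t) 0).foldl (rmStep mx) (none, none) := by
    rw [PySem.List.enumerate_cons, List.foldl_cons, List.foldl_cons]
    by_cases hc : h ≤ mx
    · simp [rmStep, hc]
    · simp [rmStep, hc]
  rw [hfold, rm_inv mx (h :: t)]
  cases hM : ((h :: t).filter (fun n => decide (n ≤ mx))).max? with
  | none =>
    have hE : (h :: t).filter (fun n => decide (n ≤ mx)) = [] := List.max?_eq_none_iff.mp hM
    rw [hE]
    have hnil : PySem.List.sorted ([] : List Int) (fun x => x) false = [] := rfl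
    simp [hnil, PySem.List.pyGet?_neg_one]
  | some M =>
    have hEne : (h :: t).filter (fun n => decide (n ≤ mx)) ≠ [] := by
      intro he; rw [he] at hM; simp at hM
    have hsne : PySem.List.sorted ((h :: t).filter (fun n => decide (n ≤ mx))) (fun x => x) false ≠ [] := by
      rw [Ne, PySem.List.sorted_eq_nil_iff]; exact hEne
    rw [PySem.List.pyGet?_neg_one, List.getLast?_eq_some_getLast hsne,
      getLast_sorted_eq_max _ M hM hsne]
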